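-- pv_equiv track=rewrite | github.com/Apoohow/verigreen-dashboard | app/main.py | _pick_best_downloaded_file
-- ===== SOURCE A (Python) =====
-- def _pick_best_downloaded_file(paths: list[str], preferred_lang: str = "zh") -> str | None:
--     if not paths:
--         return None
--     ranked: list[tuple[int, str]] = []
--     pref = (preferred_lang or "zh").lower()
--     for p in paths:
--         s = p.lower()
--         score = 99
--         if "\\esg\\" in s or "/esg/" in s:
--             score -= 20
--         if f"_{pref}.pdf" in s:
--             score -= 10
--         if s.endswith(".pdf"):
--             score -= 5
--         ranked.append((score, p))
--     ranked.sort(key=lambda x: x[0])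
--     return ranked[0][1]
-- ===== SOURCE B (Python) =====
-- def _pick_best_downloaded_file(paths: list[str], preferred_lang: str = "zh") -> str | None:
--     if not paths:
--         return None
--     pref = (preferred_lang or "zh").lower()
--     tag = f"_{pref}.pdf"
--
--     def score(p: str) -> int:
--         s = p.lower()
--         sc = 99
--         if "\\esg\\" in s or "/esg/" in s:
--             sc -= 20
--         if tag in s:
--             sc -= 10
--         if s.endswith(".pdf"):
--             sc -= 5
--         return sc
--
--     best_path = paths[0]
--     best_score = score(best_path)
--     for p in paths[1:]:
--         sc = score(p)
--         if sc < best_score: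
--             best_path, best_score = p, sc
--     return best_path
-- ===== Notes on version B (the rewrite author's own statement) =====
-- stated objective: faster
-- what changed: Drops the ranked list and the stable insertion sort; a single pass keeps the current best path and score, updating only on strictly smaller score so the first path among ties is returned.
import Mathlib
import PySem

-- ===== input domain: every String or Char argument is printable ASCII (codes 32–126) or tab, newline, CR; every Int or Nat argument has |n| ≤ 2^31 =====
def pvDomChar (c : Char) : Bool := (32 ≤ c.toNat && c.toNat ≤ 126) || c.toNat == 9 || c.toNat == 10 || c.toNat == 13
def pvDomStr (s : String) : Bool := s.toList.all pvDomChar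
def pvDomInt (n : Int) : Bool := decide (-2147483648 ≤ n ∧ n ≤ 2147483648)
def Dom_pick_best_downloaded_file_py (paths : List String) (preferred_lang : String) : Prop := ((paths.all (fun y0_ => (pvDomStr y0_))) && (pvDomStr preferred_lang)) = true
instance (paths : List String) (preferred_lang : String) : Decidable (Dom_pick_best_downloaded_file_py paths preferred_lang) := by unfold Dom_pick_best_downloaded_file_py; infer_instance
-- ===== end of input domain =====

-- B replaces A's ranked-list build + stable sort + take-first with a single strict-min pass (simpler, same result).


-- ===== PORT A =====
-- transliteration of A: build ranked list of (score, path), stable-sort by score, take ranked[0][1]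
def pick_best_downloaded_file_py (paths : List String) (preferred_lang : String) : Option String :=
  if paths = [] then none
  else
    let pref := PySem.Str.lower (if preferred_lang == "" then "zh" else preferred_lang)
    let ranked := paths.foldl (fun acc p =>
      let s := PySem.Str.lower p
      let score : Int := 99
      let score := if PySem.Str.isIn "\\esg\\" s || PySem.Str.isIn "/esg/" s then score - 20 else score
      let score := if PySem.Str.isIn (String.ofList ('_' :: pref.toList ++ ['.', 'p', 'd', 'f'])) s then score - 10 else score
      let score := if PySem.Str.endswith s ".pdf" then score - 5 else score
      acc ++ [(score, p)]) ([] : List (Int × String))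
    ((PySem.List.sorted ranked (fun x => x.1) false).head?).map (fun x => x.2)

-- ===== PORT B =====
-- B's score helper (tag = f"_{pref}.pdf" computed once)
def pvScoreB (tag : String) (p : String) : Int :=
  let s := PySem.Str.lower p
  let score : Int := 99
  let score := if PySem.Str.isIn "\\esg\\" s || PySem.Str.isIn "/esg/" s then score - 20 else score
  let score := if PySem.Str.isIn tag s then score - 10 else score
  let score := if PySem.Str.endswith s ".pdf" then score - 5 else score
  score

-- B's single pass over the remaining paths, updating on strictly smaller score
def pvLoopB (tag : String) (rest : List String) (best_path : String) (best_score : Int) : String :=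
  match rest with
  | [] => best_path
  | q :: qs =>
    let sc := pvScoreB tag q
    if sc < best_score then pvLoopB tag qs q sc else pvLoopB tag qs best_path best_score

def pick_best_downloaded_file_py_alt (paths : List String) (preferred_lang : String) : Option String :=
  match paths with
  | [] => none
  | p0 :: rest =>
    let pref := PySem.Str.lower (if preferred_lang == "" then "zh" else preferred_lang)
    let tag := String.ofList ('_' :: pref.toList ++ ['.', 'p', 'd', 'f'])
    some (pvLoopB tag rest p0 (pvScoreB tag p0))

-- ===== PRECONDITION & SPEC =====
def Spec_pick_best_downloaded_file_py (paths : List String) (preferred_lang : String) (out : Option String) : Prop := out = pick_best_downloaded_file_py_alt paths preferred_lang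
instance (paths : List String) (preferred_lang : String) (out : Option String) : Decidable (Spec_pick_best_downloaded_file_py paths preferred_lang out) := by unfold Spec_pick_best_downloaded_file_py; infer_instance

-- ===== CLAIM (what is proved, stated in full; the proofs are below) =====
def Claim_equal_pick_best_downloaded_file_py : Prop := ∀ (paths : List String) (preferred_lang : String), Dom_pick_best_downloaded_file_py paths preferred_lang → Spec_pick_best_downloaded_file_py paths preferred_lang (pick_best_downloaded_file_py paths preferred_lang)

-- ===== LEMMAS AND PROOFS =====

-- head of a stable insertion step: x lands in front iff it beats the current head
theorem pv_head?_insertBy {α : Type} (before : α → α → Bool) (x : α) (acc : List α) :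
    (PySem.List.insertBy before x acc).head? =
      match acc with
      | [] => some x
      | y :: _ => if before x y then some x else some y := by
  cases acc with
  | nil => simp [PySem.List.insertBy]
  | cons y ys => by_cases h : before x y <;> simp [PySem.List.insertBy, h]

-- the strict-min fold step used by min?/sorted-head reasoning
def pvMinStep (m : Option (Int × String)) (x : Int × String) : Option (Int × String) :=
  match m with
  | none => some x
  | some m => if x.1 < m.1 then some x else some m

-- head of the insertion-sort fold is the running strict-min fold
theorem pv_head?_foldl_insertBy (xs : List (Int × String)) (acc : List (Int × String)) :
    (xs.foldl (fun acc x => PySem.List.insertBy (fun a b => decide (a.1 < b.1)) x acc) acc).head? =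
      xs.foldl pvMinStep acc.head? := by
  induction xs generalizing acc with
  | nil => rfl
  | cons x xs ih =>
    rw [List.foldl_cons, List.foldl_cons, ih, pv_head?_insertBy]
    cases acc with
    | nil => rfl
    | cons y ys =>
      by_cases h : x.1 < y.1 <;> simp [pvMinStep, h]

-- reduction helpers (plain rfl facts used for rewriting)
theorem pvMinStep_pair (s : Int) (b : String) (t : Int) (q : String) :
    pvMinStep (some (s, b)) (t, q) = if t < s then some (t, q) else some (s, b) := rfl

theorem pvLoopB_cons (tag q : String) (qs : List String) (bp : String) (bs : Int) :
    pvLoopB tag (q :: qs) bp bs =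
      if pvScoreB tag q < bs then pvLoopB tag qs q (pvScoreB tag q) else pvLoopB tag qs bp bs := rfl

-- the strict-min fold over scored pairs is B's loop
theorem pv_minfold_eq_loop (tag : String) (qs : List String) (bp : String) :
    qs.foldl (fun m q => pvMinStep m (pvScoreB tag q, q)) (some (pvScoreB tag bp, bp)) =
      some (pvScoreB tag (pvLoopB tag qs bp (pvScoreB tag bp)), pvLoopB tag qs bp (pvScoreB tag bp)) := by
  induction qs generalizing bp with
  | nil => rfl
  | cons q qs ih =>
    rw [List.foldl_cons, pvMinStep_pair, pvLoopB_cons]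
    by_cases h : pvScoreB tag q < pvScoreB tag bp
    · rw [if_pos h, if_pos h]; exact ih q
    · rw [if_neg h, if_neg h]; exact ih bp

-- ===== VERDICT (by name: the statement is the Claim_ definition above) =====
theorem pick_best_downloaded_file_py_spec : Claim_equal_pick_best_downloaded_file_py := by
  intro paths preferred_lang _
  unfold Spec_pick_best_downloaded_file_py
  cases paths with
  | nil => rfl
  | cons p0 rest =>
    unfold pick_best_downloaded_file_py pick_best_downloaded_file_py_alt
    rw [if_neg (List.cons_ne_nil p0 rest)]
    generalize PySem.Str.lower (if preferred_lang == "" then "zh" else preferred_lang) = pref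
    show Option.map (fun x => x.2)
        (PySem.List.sorted ((p0 :: rest).foldl (fun acc p =>
          let s := PySem.Str.lower p
          let score : Int := 99
          let score := if PySem.Str.isIn "\\esg\\" s || PySem.Str.isIn "/esg/" s then score - 20 else score
          let score := if PySem.Str.isIn (String.ofList ('_' :: pref.toList ++ ['.', 'p', 'd', 'f'])) s then score - 10 else score
          let score := if PySem.Str.endswith s ".pdf" then score - 5 else score
          acc ++ [(score, p)]) ([] : List (Int × String))) (fun x => x.1) false).head? =
      some (pvLoopB (String.ofList ('_' :: pref.toList ++ ['.', 'p', 'd', 'f'])) rest p0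
        (pvScoreB (String.ofList ('_' :: pref.toList ++ ['.', 'p', 'd', 'f'])) p0))
    set tag := String.ofList ('_' :: pref.toList ++ ['.', 'p', 'd', 'f']) with htag
    have hfold : (p0 :: rest).foldl (fun acc p =>
        let s := PySem.Str.lower p
        let score : Int := 99
        let score := if PySem.Str.isIn "\\esg\\" s || PySem.Str.isIn "/esg/" s then score - 20 else score
        let score := if PySem.Str.isIn tag s then score - 10 else score
        let score := if PySem.Str.endswith s ".pdf" then score - 5 else score
        acc ++ [(score, p)]) ([] : List (Int × String)) =
        (p0 :: rest).map (fun p => (pvScoreB tag p, p)) := by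
      rw [PySem.List.foldl_append_singleton_eq_map]
      rfl
    rw [hfold, PySem.List.sorted]
    have hbefore : (if (false : Bool) = true then fun (a b : Int × String) => decide (b.1 < a.1)
        else fun (a b : Int × String) => decide (a.1 < b.1)) =
        fun (a b : Int × String) => decide (a.1 < b.1) := rfl
    rw [hbefore, pv_head?_foldl_insertBy]
    have hmap : ∀ (l : List String) (m : Option (Int × String)),
        (l.map (fun p => (pvScoreB tag p, p))).foldl pvMinStep m =
          l.foldl (fun m q => pvMinStep m (pvScoreB tag q, q)) m := by
      intro l; induction l with
      | nil => intro m; rfl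
      | cons a l ih => intro m; rw [List.map_cons, List.foldl_cons, List.foldl_cons, ih]
    rw [List.head?_nil, hmap, List.foldl_cons,
      show pvMinStep none (pvScoreB tag p0, p0) = some (pvScoreB tag p0, p0) from rfl,
      pv_minfold_eq_loop]
    rfl
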